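-- pv_equiv track=rewrite | github.com/WCRP-CMIP/Variable-Registry | .src/mkdocs/hooks/nav_post_gen_v2.py | add_custom_links_to_nav
-- ===== SOURCE A (Python) =====
-- def add_custom_links_to_nav(nav_lines, custom_links, section_title="External Links"):
--     """Add custom links to navigation with support for categories."""
--     if not custom_links:
--         return nav_lines
--
--     # Organize links by category
--     categories = {}
--     root_links = []
--
--     for link in custom_links:
--         # Skip invalid entries
--         if not isinstance(link, dict) or 'title' not in link or 'url' not in link:
--             continue
--
--         category = link.get('category')
--         if category:
--             if category not in categories:
--                 categories[category] = []
--             categories[category].append(link)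
--         else:
--             root_links.append(link)
--
--     # Add custom links section
--     if root_links or categories:
--         nav_lines.append(f'- {section_title}:')
--
--         # Add root-level links first
--         for link in root_links:
--             nav_lines.append(f'  - [{link["title"]}]({link["url"]})')
--
--         # Add categories as subsections
--         for category_name in sorted(categories.keys()):
--             nav_lines.append(f'  - {category_name}:')
--             for link in categories[category_name]:
--                 nav_lines.append(f'    - [{link["title"]}]({link["url"]})')
--
--     return nav_lines
-- ===== SOURCE B (Python) =====
-- def add_custom_links_to_nav(nav_lines, custom_links, section_title="External Links"):
--     """Add custom links to navigation with support for categories."""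
--     valid = [l for l in custom_links
--              if isinstance(l, dict) and 'title' in l and 'url' in l]
--     root = [l for l in valid if not l.get('category')]
--     cat = [l for l in valid if l.get('category')]
--     if not root and not cat:
--         return nav_lines
--     nav_lines.append(f'- {section_title}:')
--     nav_lines.extend(f'  - [{l["title"]}]({l["url"]})' for l in root)
--     for name in sorted(dict.fromkeys(l['category'] for l in cat)):
--         nav_lines.append(f'  - {name}:')
--         nav_lines.extend(f'    - [{l["title"]}]({l["url"]})'
--                          for l in cat if l['category'] == name)
--     return nav_lines
-- ===== Notes on version B (the rewrite author's own statement) =====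
-- stated objective: idiomatic
-- what changed: Replaces A's incrementally built dict-of-lists (membership check, insert-empty, append) with comprehension-based partitioning into root/categorized links and emission of each category group by sorting the distinct category names and filtering the categorized list per name - no hash index is maintained.
import Mathlib
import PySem

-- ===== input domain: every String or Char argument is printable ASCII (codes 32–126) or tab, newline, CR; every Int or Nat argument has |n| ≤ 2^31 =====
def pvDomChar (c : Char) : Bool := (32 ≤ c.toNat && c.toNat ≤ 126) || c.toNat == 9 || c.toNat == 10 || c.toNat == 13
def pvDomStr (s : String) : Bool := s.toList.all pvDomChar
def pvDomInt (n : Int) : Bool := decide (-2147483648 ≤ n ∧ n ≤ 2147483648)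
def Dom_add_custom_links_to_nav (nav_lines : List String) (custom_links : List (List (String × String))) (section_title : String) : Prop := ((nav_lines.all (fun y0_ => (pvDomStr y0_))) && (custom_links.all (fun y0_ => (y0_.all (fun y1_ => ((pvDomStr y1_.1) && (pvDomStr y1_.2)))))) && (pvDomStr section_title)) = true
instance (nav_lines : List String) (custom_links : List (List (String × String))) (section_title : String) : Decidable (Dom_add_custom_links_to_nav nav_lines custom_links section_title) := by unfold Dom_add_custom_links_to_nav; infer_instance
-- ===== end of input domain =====

-- B replaces A's incrementally built dict-of-lists with comprehension partitioning and
-- per-category filtering over the sorted distinct category names (idiomatic; no hash index).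
-- Both A and B append the same lines to nav_lines in place; the equivalence is about the return value.

-- ===== PORT A =====
-- a link is a Python dict given as an association list; lookups go through PySem.Dict.ofList
-- (CPython dict construction: later duplicate keys overwrite earlier ones)
def pvGet (link : List (String × String)) (k : String) : Option String :=
  (PySem.Dict.ofList link).get? k

def pvFmt (indent : String) (link : List (String × String)) : String :=
  indent ++ "- [" ++ (pvGet link "title").getD "" ++ "](" ++ (pvGet link "url").getD "" ++ ")"

-- the body of A's first for-loop (state = (categories, root_links))
def pvAStep (s : PySem.Dict String (List (List (String × String))) × List (List (String × String)))
    (link : List (String × String)) :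
    PySem.Dict String (List (List (String × String))) × List (List (String × String)) :=
  if (pvGet link "title").isNone || (pvGet link "url").isNone then s
  else
    match pvGet link "category" with
    | some c =>
        if c ≠ "" then
          let cats := if s.1.contains c then s.1 else s.1.insert c []
          (cats.modify c [] (fun g => g ++ [link]), s.2)
        else (s.1, s.2 ++ [link])
    | none => (s.1, s.2 ++ [link])

def add_custom_links_to_nav (nav_lines : List String) (custom_links : List (List (String × String))) (section_title : String) : List String :=
  if custom_links = [] then nav_lines
  else
    let st0 := custom_links.foldl pvAStep (PySem.Dict.empty, [])
    let categories := st0.1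
    let root_links := st0.2
    if root_links ≠ [] ∨ categories.keys ≠ [] then
      let nav1 := nav_lines ++ ["- " ++ section_title ++ ":"]
      let nav2 := root_links.foldl (fun acc l => acc ++ [pvFmt "  " l]) nav1
      let nav3 := (PySem.List.sorted categories.keys (fun c => c) false).foldl
        (fun acc c =>
          (categories.getD c []).foldl (fun acc2 l => acc2 ++ [pvFmt "    " l])
            (acc ++ ["  - " ++ c ++ ":"])) nav2
      nav3
    else nav_lines

-- ===== PORT B =====
-- truthiness of link.get('category'): None and "" are falsy
def pvCatKey (link : List (String × String)) : String :=
  (pvGet link "category").getD ""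

def add_custom_links_to_nav_alt (nav_lines : List String) (custom_links : List (List (String × String))) (section_title : String) : List String :=
  let valid := custom_links.filter (fun l => (pvGet l "title").isSome && (pvGet l "url").isSome)
  let root := valid.filter (fun l => pvCatKey l == "")
  let cat := valid.filter (fun l => !(pvCatKey l == ""))
  if root = [] ∧ cat = [] then nav_lines
  else
    nav_lines ++ ["- " ++ section_title ++ ":"]
      ++ root.map (pvFmt "  ")
      ++ (PySem.List.sorted (PySem.List.dedup (cat.map pvCatKey)) (fun c => c) false).flatMap
           (fun name => ("  - " ++ name ++ ":") ::
             (cat.filter (fun l => pvCatKey l == name)).map (pvFmt "    "))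

-- ===== PRECONDITION & SPEC =====
def Spec_add_custom_links_to_nav (nav_lines : List String) (custom_links : List (List (String × String))) (section_title : String) (out : List String) : Prop := out = add_custom_links_to_nav_alt nav_lines custom_links section_title
instance (nav_lines : List String) (custom_links : List (List (String × String))) (section_title : String) (out : List String) : Decidable (Spec_add_custom_links_to_nav nav_lines custom_links section_title out) := by unfold Spec_add_custom_links_to_nav; infer_instance

-- ===== CLAIM (what is proved, stated in full; the proofs are below) =====
def Claim_equal_add_custom_links_to_nav : Prop := ∀ (nav_lines : List String) (custom_links : List (List (String × String))) (section_title : String), Dom_add_custom_links_to_nav nav_lines custom_links section_title → Spec_add_custom_links_to_nav nav_lines custom_links section_title (add_custom_links_to_nav nav_lines custom_links section_title)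

-- ===== LEMMAS AND PROOFS =====

-- validity test shared by the statements of the loop-characterization lemma
def pvValidB (l : List (String × String)) : Bool :=
  (pvGet l "title").isSome && (pvGet l "url").isSome

-- `if category not in categories: categories[category] = []` followed by the append,
-- seen through keys / getD
theorem pvSd_keys (d : PySem.Dict String (List (List (String × String)))) (c : String)
    (link : List (String × String)) :
    ((if d.contains c then d else d.insert c []).modify c [] (fun g => g ++ [link])).keys
      = PySem.Set.add d.keys c := by
  by_cases h : d.contains c = true
  · have hm : c ∈ d.keys := by
      simpa [PySem.Dict.contains_eq_decide_mem_keys] using h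
    rw [if_pos h, PySem.Dict.keys_modify, PySem.Dict.keys_insert_of_contains _ _ h]
    simp [PySem.Set.add, hm]
  · have hf : d.contains c = false := by simpa using h
    have hm : c ∉ d.keys := by
      simpa [PySem.Dict.contains_eq_decide_mem_keys] using hf
    rw [if_neg h, PySem.Dict.keys_modify,
      PySem.Dict.keys_insert_of_contains _ _ (by simp [PySem.Dict.contains_insert_self]),
      PySem.Dict.keys_insert_of_not_contains _ _ hf]
    simp [PySem.Set.add, hm]

theorem pvSd_nodup (d : PySem.Dict String (List (List (String × String)))) (c : String)
    (link : List (String × String)) (hnd : d.keys.Nodup) :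
    ((if d.contains c then d else d.insert c []).modify c [] (fun g => g ++ [link])).keys.Nodup := by
  rw [pvSd_keys]
  by_cases hm : c ∈ d.keys
  · simpa [PySem.Set.add, hm] using hnd
  · simp only [PySem.Set.add]
    split_ifs with h
    · exact hnd
    · simp [List.nodup_append]
      exact ⟨hnd, fun a ha hac => hm (hac ▸ ha)⟩

theorem pvSd_getD (d : PySem.Dict String (List (List (String × String)))) (c c' : String)
    (link : List (String × String)) :
    ((if d.contains c then d else d.insert c []).modify c [] (fun g => g ++ [link])).getD c' []
      = if c' = c then d.getD c [] ++ [link] else d.getD c' [] := by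
  by_cases h : d.contains c = true
  · rw [if_pos h, PySem.Dict.getD_modify]
  · have hf : d.contains c = false := by simpa using h
    rw [if_neg h, PySem.Dict.getD_modify]
    rw [PySem.Dict.getD_insert_self, PySem.Dict.getD_of_not_contains _ _ hf,
      PySem.Dict.getD_insert]
    split_ifs with h1 <;> simp_all

-- characterization of A's first loop, by induction generalizing the initial state
theorem pvA_char (cls : List (List (String × String)))
    (d : PySem.Dict String (List (List (String × String)))) (r : List (List (String × String)))
    (hnd : d.keys.Nodup) :
    (cls.foldl pvAStep (d, r)).2
      = r ++ (cls.filter pvValidB).filter (fun l => pvCatKey l == "") ∧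
    (cls.foldl pvAStep (d, r)).1.keys
      = PySem.Set.update d.keys
          (((cls.filter pvValidB).filter (fun l => !(pvCatKey l == ""))).map pvCatKey) ∧
    (cls.foldl pvAStep (d, r)).1.keys.Nodup ∧
    ∀ c : String,
      (cls.foldl pvAStep (d, r)).1.getD c []
        = d.getD c []
            ++ ((cls.filter pvValidB).filter (fun l => !(pvCatKey l == ""))).filter
                 (fun l => pvCatKey l == c) := by
  induction cls generalizing d r with
  | nil => simp [PySem.Set.update, hnd]
  | cons link rest ih =>
    rcases ht : pvGet link "title" with _ | t
    · have hstep : pvAStep (d, r) link = (d, r) := by simp [pvAStep, ht]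
      have hv : pvValidB link = false := by simp [pvValidB, ht]
      simpa [List.foldl_cons, hstep, List.filter_cons, hv] using ih d r hnd
    · rcases hu : pvGet link "url" with _ | u
      · have hstep : pvAStep (d, r) link = (d, r) := by simp [pvAStep, ht, hu]
        have hv : pvValidB link = false := by simp [pvValidB, hu]
        simpa [List.foldl_cons, hstep, List.filter_cons, hv] using ih d r hnd
      · have hv : pvValidB link = true := by simp [pvValidB, ht, hu]
        rcases hc : pvGet link "category" with _ | c
        · -- no category: root link
          have hstep : pvAStep (d, r) link = (d, r ++ [link]) := by simp [pvAStep, ht, hu, hc]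
          have hk : pvCatKey link = "" := by simp [pvCatKey, hc]
          obtain ⟨ih1, ih2, ih3, ih4⟩ := ih d (r ++ [link]) hnd
          refine ⟨?_, ?_, ?_, ?_⟩
          · rw [List.foldl_cons, hstep, ih1]
            simp [hv, hk, List.append_assoc]
          · rw [List.foldl_cons, hstep, ih2]
            simp [hv, hk]
          · rw [List.foldl_cons, hstep]; exact ih3
          · intro c'
            rw [List.foldl_cons, hstep, ih4 c']
            simp [hv, hk]
        · by_cases hce : c = ""
          · -- falsy category "": root link
            have hstep : pvAStep (d, r) link = (d, r ++ [link]) := by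
              simp [pvAStep, ht, hu, hc, hce]
            have hk : pvCatKey link = "" := by simp [pvCatKey, hc, hce]
            obtain ⟨ih1, ih2, ih3, ih4⟩ := ih d (r ++ [link]) hnd
            refine ⟨?_, ?_, ?_, ?_⟩
            · rw [List.foldl_cons, hstep, ih1]
              simp [hv, hk, List.append_assoc]
            · rw [List.foldl_cons, hstep, ih2]
              simp [hv, hk]
            · rw [List.foldl_cons, hstep]; exact ih3
            · intro c'
              rw [List.foldl_cons, hstep, ih4 c']
              simp [hv, hk]
          · -- real category
            have hk : pvCatKey link = c := by simp [pvCatKey, hc]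
            have hstep : pvAStep (d, r) link
                = ((if d.contains c then d else d.insert c []).modify c []
                    (fun g => g ++ [link]), r) := by
              simp [pvAStep, ht, hu, hc, hce]
            obtain ⟨ih1, ih2, ih3, ih4⟩ :=
              ih ((if d.contains c then d else d.insert c []).modify c [] (fun g => g ++ [link]))
                r (pvSd_nodup d c link hnd)
            refine ⟨?_, ?_, ?_, ?_⟩
            · simpa [List.foldl_cons, hstep, List.filter_cons, hv, hk, hce] using ih1
            · rw [List.foldl_cons, hstep]
              rw [ih2, pvSd_keys]
              simp [hv, hk, hce, PySem.Set.update]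
            · simpa [List.foldl_cons, hstep] using ih3
            · intro c'
              rw [List.foldl_cons, hstep, ih4 c', pvSd_getD]
              by_cases hcc : c' = c
              · subst hcc
                simp [hv, hk, hce, List.append_assoc]
              · have hne : ¬c = c' := fun h => hcc h.symm
                simp [hv, hk, hce, hcc, hne]

theorem pvOfList_ne_nil {α : Type} [BEq α] [LawfulBEq α] (x : α) (xs : List α) :
    PySem.Set.ofList (x :: xs) ≠ [] := by
  have : x ∈ PySem.Set.ofList (x :: xs) := by
    rw [PySem.Set.mem_ofList]; exact List.mem_cons_self ..
  exact List.ne_nil_of_mem this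

-- ===== VERDICT (by name: the statement is the Claim_ definition above) =====
theorem add_custom_links_to_nav_spec : Claim_equal_add_custom_links_to_nav := by
  intro nav cls st _
  unfold Spec_add_custom_links_to_nav add_custom_links_to_nav add_custom_links_to_nav_alt
  by_cases hnil : cls = []
  · simp [hnil]
  · rw [if_neg hnil]
    obtain ⟨h2, hkeys, _, hgetD⟩ :=
      pvA_char cls PySem.Dict.empty [] (by simp [PySem.Dict.keys_empty])
    have hcat : ((cls.filter pvValidB).filter (fun l => !(pvCatKey l == "")))
        = (cls.filter (fun l => (pvGet l "title").isSome && (pvGet l "url").isSome)).filter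
            (fun l => !(pvCatKey l == "")) := rfl
    set cat := (cls.filter (fun l => (pvGet l "title").isSome && (pvGet l "url").isSome)).filter
        (fun l => !(pvCatKey l == "")) with hcatdef
    set root := (cls.filter (fun l => (pvGet l "title").isSome && (pvGet l "url").isSome)).filter
        (fun l => pvCatKey l == "") with hrootdef
    have hroot2 : (cls.filter pvValidB).filter (fun l => pvCatKey l == "") = root := rfl
    have hkeys2 : (cls.foldl pvAStep (PySem.Dict.empty, [])).1.keys
        = PySem.Set.ofList (cat.map pvCatKey) := by
      rw [hkeys, PySem.Set.ofList_eq_foldl, hcat]; rfl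
    have hout : ∀ c, (cls.foldl pvAStep (PySem.Dict.empty, [])).1.getD c []
        = cat.filter (fun l => pvCatKey l == c) := by
      intro c; rw [hgetD c, hcat]; simp [PySem.Dict.getD_empty]
    have h2' : (cls.foldl pvAStep (PySem.Dict.empty, [])).2 = root := by
      rw [h2, hroot2]; simp
    by_cases hempty : root = [] ∧ cat = []
    · rcases hempty with ⟨he1, he2⟩
      have hg : ¬((cls.foldl pvAStep (PySem.Dict.empty, [])).2 ≠ []
          ∨ (cls.foldl pvAStep (PySem.Dict.empty, [])).1.keys ≠ []) := by
        rw [h2', hkeys2, he1, he2]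
        simp [PySem.Set.ofList_eq_foldl]
      rw [if_neg hg, if_pos ⟨he1, he2⟩]
    · have hg : (cls.foldl pvAStep (PySem.Dict.empty, [])).2 ≠ []
          ∨ (cls.foldl pvAStep (PySem.Dict.empty, [])).1.keys ≠ [] := by
        rcases not_and_or.mp hempty with he | he
        · exact Or.inl (by rw [h2']; exact he)
        · refine Or.inr ?_
          rw [hkeys2]
          rcases hce : cat with _ | ⟨l0, rest⟩
          · exact absurd hce he
          · simpa [hce] using pvOfList_ne_nil (pvCatKey l0) (rest.map pvCatKey)
      rw [if_pos hg, if_neg hempty]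
      simp only [h2', hkeys2, hout, PySem.List.foldl_append_singleton_eq_map,
        PySem.List.dedup_eq_ofList, List.append_assoc, List.singleton_append]
      rw [PySem.List.foldl_append_eq_flatMap
        (fun c => ("  - " ++ c ++ ":") :: (cat.filter (fun l => pvCatKey l == c)).map (pvFmt "    "))]
      simp only [hcatdef, hrootdef, List.filter_filter, List.append_assoc]
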